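-- pv_equiv track=rewrite | github.com/kervyntan/leetcode-grind | efficient_string_concatenation.py | appear_n
-- ===== SOURCE A (Python) =====
-- def appear_n(str1, str2, n):
--     res = []
--     counter_first = 0
--     counter_second = 0
--
--     for char in str1:
--         # look at the first character
--         counter_first = str1.count(char)
--         counter_second = str2.count(char)
--
--         if (counter_first >= n and counter_second >= n):
--             if (char not in res):
--                 res.append(char)
--
--     return res
-- ===== SOURCE B (Python) =====
-- def appear_n(str1, str2, n):
--     c1 = {}
--     for ch in str1:
--         c1[ch] = c1.get(ch, 0) + 1
--     c2 = {}
--     for ch in str2: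
--         c2[ch] = c2.get(ch, 0) + 1
--     return [ch for ch in c1 if c1[ch] >= n and c2.get(ch, 0) >= n]
-- ===== Notes on version B (the rewrite author's own statement) =====
-- stated objective: faster
-- what changed: Replaces A's per-character rescan (str.count of both strings at every position plus a linear dedup membership test on the result list) with two frequency dicts built in one pass each, then a single comprehension over the distinct keys of the first dict (insertion order = first-occurrence order).
import Mathlib
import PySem

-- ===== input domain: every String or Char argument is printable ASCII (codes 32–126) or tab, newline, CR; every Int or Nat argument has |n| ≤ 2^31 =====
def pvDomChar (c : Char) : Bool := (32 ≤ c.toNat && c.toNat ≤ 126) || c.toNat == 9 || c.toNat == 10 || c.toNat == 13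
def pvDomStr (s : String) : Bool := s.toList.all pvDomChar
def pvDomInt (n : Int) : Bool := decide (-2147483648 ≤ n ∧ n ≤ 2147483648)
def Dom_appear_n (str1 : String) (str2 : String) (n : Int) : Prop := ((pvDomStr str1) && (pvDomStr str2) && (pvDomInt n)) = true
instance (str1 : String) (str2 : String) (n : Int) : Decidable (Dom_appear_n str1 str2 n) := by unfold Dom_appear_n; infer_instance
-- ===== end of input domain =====

-- B replaces A's per-character rescan (str.count of both strings at every position, plus a
-- linear dedup membership test) with two one-pass frequency dicts and a single comprehension
-- over the distinct keys of the first dict (insertion order = first-occurrence order): faster.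

-- ===== PORT A =====
-- Literal port of A: for each character of str1, recount it in both whole strings,
-- and append it (as a 1-char string) to res if both counts reach n and it is not yet in res.
def appear_n (str1 : String) (str2 : String) (n : Int) : List String :=
  str1.toList.foldl
    (fun res char =>
      let counter_first : Int := (PySem.Str.count str1 (String.ofList [char]) : Int)
      let counter_second : Int := (PySem.Str.count str2 (String.ofList [char]) : Int)
      if counter_first ≥ n ∧ counter_second ≥ n then
        if String.ofList [char] ∉ res then res ++ [String.ofList [char]] else res
      else res)
    []

-- ===== PORT B =====
-- Literal port of B: frequency dicts c1, c2 built in one pass each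
-- (c[ch] = c.get(ch, 0) + 1), then a comprehension over c1's keys.
def appear_n_alt (str1 : String) (str2 : String) (n : Int) : List String :=
  let c1 : PySem.Dict Char Int :=
    str1.toList.foldl (fun d ch => d.modify ch 0 (· + 1)) PySem.Dict.empty
  let c2 : PySem.Dict Char Int :=
    str2.toList.foldl (fun d ch => d.modify ch 0 (· + 1)) PySem.Dict.empty
  (c1.keys.filter (fun ch => decide (c1.getD ch 0 ≥ n) && decide (c2.getD ch 0 ≥ n))).map
    (fun ch => String.ofList [ch])

-- ===== PRECONDITION & SPEC =====
def Spec_appear_n (str1 : String) (str2 : String) (n : Int) (out : List String) : Prop := out = appear_n_alt str1 str2 n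
instance (str1 : String) (str2 : String) (n : Int) (out : List String) : Decidable (Spec_appear_n str1 str2 n out) := by unfold Spec_appear_n; infer_instance

-- ===== CLAIM (what is proved, stated in full; the proofs are below) =====
def Claim_equal_appear_n : Prop := ∀ (str1 : String) (str2 : String) (n : Int), Dom_appear_n str1 str2 n → Spec_appear_n str1 str2 n (appear_n str1 str2 n)

-- ===== LEMMAS AND PROOFS =====

-- Python str.count with a single-character needle is the character count.
lemma count_go_singleton (c : Char) : ∀ (l : List Char) (fuel acc : Nat), l.length ≤ fuel →
    PySem.Chars.count.go [c] fuel l acc = acc + l.count c := by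
  intro l
  induction l with
  | nil => intro fuel acc _; cases fuel <;> simp [PySem.Chars.count.go]
  | cons h t ih =>
    intro fuel acc hle
    cases fuel with
    | zero => simp at hle
    | succ f =>
      rw [PySem.Chars.count.go]
      by_cases hc : c = h
      · subst hc
        have hp : [c].isPrefixOf (c :: t) = true := by simp [List.isPrefixOf]
        rw [hp]
        simp only [if_true, List.length_cons, List.length_nil, Nat.zero_add, List.drop_one,
          List.tail_cons]
        rw [ih f (acc + 1) (by simpa using hle)]
        simp; omega
      · have hp : [c].isPrefixOf (h :: t) = false := by
          simp [List.isPrefixOf]; exact fun hb => absurd hb hc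
        rw [hp]
        simp only [Bool.false_eq_true, if_false]
        rw [ih f acc (by simpa using hle)]
        simp [Ne.symm hc]

lemma str_count_singleton (s : String) (c : Char) :
    PySem.Str.count s (String.ofList [c]) = s.toList.count c := by
  rw [PySem.Str.count_eq, show (String.ofList [c]).toList = [c] from by simp]
  unfold PySem.Chars.count
  simp only [List.isEmpty_cons, if_false, Bool.false_eq_true]
  simpa using count_go_singleton c s.toList s.toList.length 0 le_rfl

-- String.ofList of a singleton is injective in the character.
lemma mk_singleton_inj {c c' : Char} (h : String.ofList [c] = String.ofList [c']) : c = c' := by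
  have := congrArg String.toList h
  simpa using this

lemma mem_map_mk (s : List Char) (c : Char) :
    (String.ofList [c] ∈ s.map (fun x => String.ofList [x])) ↔ c ∈ s := by
  constructor
  · intro h
    rcases List.mem_map.mp h with ⟨x, hx, hmk⟩
    exact (mk_singleton_inj hmk.symm) ▸ hx
  · intro h; exact List.mem_map_of_mem h

-- A's dedup-append loop, restricted to a fixed predicate q, is Set.add folding under map mk.
lemma loopA (q : Char → Prop) [DecidablePred q] :
    ∀ (l s : List Char),
      l.foldl
        (fun res c =>
          if q c then
            if String.ofList [c] ∉ res then res ++ [String.ofList [c]] else res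
          else res)
        (s.map (fun x => String.ofList [x]))
      = ((l.filter (fun c => decide (q c))).foldl PySem.Set.add s).map (fun x => String.ofList [x]) := by
  intro l
  induction l with
  | nil => intro s; simp
  | cons c t ih =>
    intro s
    by_cases hq : q c
    · have hfil : (c :: t).filter (fun c => decide (q c)) =
        c :: t.filter (fun c => decide (q c)) := by simp [hq]
      rw [hfil]
      simp only [List.foldl_cons, if_pos hq]
      by_cases hm : c ∈ s
      · have : ¬ String.ofList [c] ∉ s.map (fun x => String.ofList [x]) := by
          simp [mem_map_mk, hm]
        rw [if_neg this]
        have hadd : PySem.Set.add s c = s := by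
          simp [PySem.Set.add, PySem.Set.contains, hm]
        rw [hadd]; exact ih s
      · have : String.ofList [c] ∉ s.map (fun x => String.ofList [x]) := by
          simp [mem_map_mk, hm]
        rw [if_pos this]
        have hadd : PySem.Set.add s c = s ++ [c] := by
          simp only [PySem.Set.add, PySem.Set.contains]
          rw [if_neg (by simp [hm])]
        rw [hadd]
        have : (s.map (fun x => String.ofList [x])) ++ [String.ofList [c]] =
            (s ++ [c]).map (fun x => String.ofList [x]) := by simp
        rw [this]; exact ih (s ++ [c])
    · have hfil : (c :: t).filter (fun c => decide (q c)) =
        t.filter (fun c => decide (q c)) := by simp [hq]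
      rw [hfil]
      simp only [List.foldl_cons, if_neg hq]
      exact ih s

-- filtering commutes with the Set.add fold (dedup of a filtered list = filter of the dedup).
lemma foldl_add_filter (q : Char → Bool) :
    ∀ (l s : List Char),
      (l.foldl PySem.Set.add s).filter q = (l.filter q).foldl PySem.Set.add (s.filter q) := by
  intro l
  induction l with
  | nil => intro s; simp
  | cons c t ih =>
    intro s
    simp only [List.foldl_cons]
    by_cases hq : q c
    · have hfil : (c :: t).filter q = c :: t.filter q := by simp [hq]
      rw [hfil]
      simp only [List.foldl_cons]
      have hstep : (PySem.Set.add s c).filter q = PySem.Set.add (s.filter q) c := by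
        by_cases hm : c ∈ s
        · have h1 : PySem.Set.add s c = s := by
            simp [PySem.Set.add, PySem.Set.contains, hm]
          have h2 : PySem.Set.add (s.filter q) c = s.filter q := by
            have : c ∈ s.filter q := List.mem_filter.mpr ⟨hm, hq⟩
            simp [PySem.Set.add, PySem.Set.contains, this]
          rw [h1, h2]
        · have h1 : PySem.Set.add s c = s ++ [c] := by
            simp only [PySem.Set.add, PySem.Set.contains]
            rw [if_neg (by simp [hm])]
          have hnm : c ∉ s.filter q := fun h => hm (List.mem_filter.mp h).1
          have h2 : PySem.Set.add (s.filter q) c = s.filter q ++ [c] := by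
            simp only [PySem.Set.add, PySem.Set.contains]
            rw [if_neg (by simp [hnm])]
          rw [h1, h2, List.filter_append]
          simp [hq]
      rw [← hstep] at *; rw [ih (PySem.Set.add s c), hstep]
    · have hfil : (c :: t).filter q = t.filter q := by simp [hq]
      rw [hfil]
      have hstep : (PySem.Set.add s c).filter q = s.filter q := by
        by_cases hm : c ∈ s
        · simp [PySem.Set.add, PySem.Set.contains, hm]
        · have h1 : PySem.Set.add s c = s ++ [c] := by
            simp only [PySem.Set.add, PySem.Set.contains]
            rw [if_neg (by simp [hm])]
          rw [h1, List.filter_append]; simp [hq]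
      rw [← hstep]; exact ih (PySem.Set.add s c)

-- ===== VERDICT (by name: the statement is the Claim_ definition above) =====
theorem appear_n_spec : Claim_equal_appear_n := by
  unfold Claim_equal_appear_n
  intro str1 str2 n _
  unfold Spec_appear_n appear_n appear_n_alt
  simp only [str_count_singleton]
  -- rewrite B's counters via the Counter lemmas
  have hc1 : str1.toList.foldl (fun d ch => d.modify ch 0 (· + 1)) PySem.Dict.empty
      = PySem.Dict.counter str1.toList := rfl
  have hc2 : str2.toList.foldl (fun d ch => d.modify ch 0 (· + 1)) PySem.Dict.empty
      = PySem.Dict.counter str2.toList := rfl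
  rw [hc1, hc2, PySem.Dict.keys_counter]
  have hq : (fun ch => decide ((PySem.Dict.counter str1.toList).getD ch 0 ≥ n) &&
              decide ((PySem.Dict.counter str2.toList).getD ch 0 ≥ n))
      = (fun c => decide ((str1.toList.count c : Int) ≥ n ∧ (str2.toList.count c : Int) ≥ n)) := by
    funext ch
    rw [PySem.Dict.getD_counter, PySem.Dict.getD_counter]
    simp
  rw [hq]
  have hA := loopA (fun c => (str1.toList.count c : Int) ≥ n ∧ (str2.toList.count c : Int) ≥ n)
      str1.toList []
  simp only [List.map_nil] at hA
  rw [hA]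
  have hB := foldl_add_filter
      (fun c => decide ((str1.toList.count c : Int) ≥ n ∧ (str2.toList.count c : Int) ≥ n))
      str1.toList []
  simp only [List.filter_nil] at hB
  show _ = ((PySem.Set.ofList str1.toList).filter _).map _
  unfold PySem.Set.ofList PySem.Set.empty
  rw [hB]
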